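-- pv_equiv track=rewrite | github.com/ReneiloeSegobai/Python-Gradebook.py | Introduction to python.py | calculate_subject_extremes
-- ===== SOURCE A (Python) =====
-- def calculate_subject_extremes(students, subjects):
--     subject_extremes = {subject: {'highest': None, 'lowest': None} for subject in subjects}
--
--     for name, grades in students.items():
--         for subject in subjects:
--             subject_grades = grades.get(subject, [])
--             for grade in subject_grades:
--                 if subject_extremes[subject]['highest'] is None or grade > subject_extremes[subject]['highest']:
--                     subject_extremes[subject]['highest'] = grade
--                 if subject_extremes[subject]['lowest'] is None or grade < subject_extremes[subject]['lowest']: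
--                     subject_extremes[subject]['lowest'] = grade
--
--     return subject_extremes
-- ===== SOURCE B (Python) =====
-- def calculate_subject_extremes(students, subjects):
--     result = {}
--     for subject in dict.fromkeys(subjects):
--         gs = [g for grades in students.values() for g in grades.get(subject, [])]
--         result[subject] = {'highest': max(gs) if gs else None,
--                           'lowest': min(gs) if gs else None}
--     return result
-- ===== Notes on version B (the rewrite author's own statement) =====
-- stated objective: simpler
-- what changed: Replaces the interleaved running-min/max dict mutation over students x subjects x grades with a per-subject collect-then-reduce: one comprehension gathers all grades for the subject and max/min built-ins produce the extremes.
import Mathlib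
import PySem

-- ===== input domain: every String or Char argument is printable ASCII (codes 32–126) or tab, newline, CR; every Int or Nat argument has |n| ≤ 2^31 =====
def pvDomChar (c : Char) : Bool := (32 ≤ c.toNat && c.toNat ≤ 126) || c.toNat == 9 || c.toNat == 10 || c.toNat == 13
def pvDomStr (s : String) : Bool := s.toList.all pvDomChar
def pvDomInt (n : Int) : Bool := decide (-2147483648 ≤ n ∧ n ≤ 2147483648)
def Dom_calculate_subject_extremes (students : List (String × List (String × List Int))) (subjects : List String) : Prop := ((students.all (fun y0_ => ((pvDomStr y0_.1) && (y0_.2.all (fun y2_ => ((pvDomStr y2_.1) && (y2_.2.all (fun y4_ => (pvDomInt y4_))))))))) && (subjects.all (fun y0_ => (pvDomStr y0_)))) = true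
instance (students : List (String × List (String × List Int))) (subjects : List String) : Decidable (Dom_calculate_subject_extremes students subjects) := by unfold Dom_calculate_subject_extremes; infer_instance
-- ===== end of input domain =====

-- B replaces A's interleaved running-min/max dict mutation with a per-subject
-- collect-then-reduce (gather all grades for the subject, then max/min); same cost, simpler.

-- ===== PORT A =====
-- the body of 'for grade in subject_grades: …' (two sequential conditional dict updates)
def pvGradeStep (subject : String) (d : PySem.Dict String (Option Int × Option Int)) (grade : Int) :
    PySem.Dict String (Option Int × Option Int) :=
  let c1 := d.getD subject (none, none)
  let d' :=
    match c1.1 with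
    | none => d.insert subject (some grade, c1.2)
    | some h0 => if grade > h0 then d.insert subject (some grade, c1.2) else d
  let c2 := d'.getD subject (none, none)
  match c2.2 with
  | none => d'.insert subject (c2.1, some grade)
  | some l0 => if grade < l0 then d'.insert subject (c2.1, some grade) else d'

-- the body of 'for subject in subjects: …' for one student's grades dict
def pvSubjStep (grades : List (String × List Int)) (d : PySem.Dict String (Option Int × Option Int))
    (subject : String) : PySem.Dict String (Option Int × Option Int) :=
  ((PySem.Dict.mk grades).getD subject []).foldl (pvGradeStep subject) d

def calculate_subject_extremes (students : List (String × List (String × List Int))) (subjects : List String) : List (String × List (String × Option Int)) :=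
  let d0 : PySem.Dict String (Option Int × Option Int) :=
    subjects.foldl (fun d s => d.insert s (none, none)) PySem.Dict.empty
  let d1 := students.foldl (fun d nb => subjects.foldl (pvSubjStep nb.2) d) d0
  d1.items.map (fun p => (p.1, [("highest", p.2.1), ("lowest", p.2.2)]))

-- ===== PORT B =====
def calculate_subject_extremes_alt (students : List (String × List (String × List Int))) (subjects : List String) : List (String × List (String × Option Int)) :=
  (PySem.List.dedup subjects).map (fun subject =>
    let gs := students.flatMap (fun nb => (PySem.Dict.mk nb.2).getD subject [])
    (subject, [("highest", PySem.List.max? gs (fun x => x)),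
               ("lowest", PySem.List.min? gs (fun x => x))]))

-- ===== PRECONDITION & SPEC =====
def Spec_calculate_subject_extremes (students : List (String × List (String × List Int))) (subjects : List String) (out : List (String × List (String × Option Int))) : Prop := out = calculate_subject_extremes_alt students subjects
instance (students : List (String × List (String × List Int))) (subjects : List String) (out : List (String × List (String × Option Int))) : Decidable (Spec_calculate_subject_extremes students subjects out) := by unfold Spec_calculate_subject_extremes; infer_instance

-- ===== CLAIM (what is proved, stated in full; the proofs are below) =====
def Claim_equal_calculate_subject_extremes : Prop := ∀ (students : List (String × List (String × List Int))) (subjects : List String), Dom_calculate_subject_extremes students subjects → Spec_calculate_subject_extremes students subjects (calculate_subject_extremes students subjects)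

-- ===== LEMMAS AND PROOFS =====

-- pointwise running-extreme updates (what one grade does to one subject's pair)
def pvUpdMax (o : Option Int) (g : Int) : Option Int :=
  match o with
  | none => some g
  | some h => if g > h then some g else some h

def pvUpdMin (o : Option Int) (g : Int) : Option Int :=
  match o with
  | none => some g
  | some l => if g < l then some g else some l

def pvUpd (p : Option Int × Option Int) (g : Int) : Option Int × Option Int :=
  (pvUpdMax p.1 g, pvUpdMin p.2 g)

-- all grades for a subject, across students, in traversal order
def pvGs (students : List (String × List (String × List Int))) (subject : String) : List Int :=
  students.flatMap (fun nb => (PySem.Dict.mk nb.2).getD subject [])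

theorem pvGradeStep_getD_self (s : String) (d : PySem.Dict String (Option Int × Option Int)) (g : Int) :
    (pvGradeStep s d g).getD s (none, none) = pvUpd (d.getD s (none, none)) g := by
  unfold pvGradeStep pvUpd pvUpdMax pvUpdMin
  rcases h : d.getD s (none, none) with ⟨h1, h2⟩
  cases h1 <;> cases h2 <;>
    simp only [h] <;> (try split_ifs) <;>
    simp_all [PySem.Dict.getD_insert_self] <;> (try split_ifs) <;>
    simp_all [PySem.Dict.getD_insert_self] <;> omega

theorem pvGradeStep_getD_ne (s k : String) (hk : k ≠ s)
    (d : PySem.Dict String (Option Int × Option Int)) (g : Int) :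
    (pvGradeStep s d g).getD k (none, none) = d.getD k (none, none) := by
  unfold pvGradeStep
  rcases h : d.getD s (none, none) with ⟨h1, h2⟩
  cases h1 <;> cases h2 <;>
    simp only [h] <;> (try split_ifs) <;>
    simp_all [PySem.Dict.getD_insert_self, PySem.Dict.getD_insert, hk] <;> (try split_ifs) <;>
    simp_all [PySem.Dict.getD_insert_self, PySem.Dict.getD_insert, hk]

theorem pvGradeFold_getD_self (s : String) (gs : List Int)
    (d : PySem.Dict String (Option Int × Option Int)) :
    (gs.foldl (pvGradeStep s) d).getD s (none, none) =
      gs.foldl pvUpd (d.getD s (none, none)) := by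
  induction gs generalizing d with
  | nil => rfl
  | cons g t ih => simp [List.foldl_cons, ih, pvGradeStep_getD_self]

theorem pvGradeFold_getD_ne (s k : String) (hk : k ≠ s) (gs : List Int)
    (d : PySem.Dict String (Option Int × Option Int)) :
    (gs.foldl (pvGradeStep s) d).getD k (none, none) = d.getD k (none, none) := by
  induction gs generalizing d with
  | nil => rfl
  | cons g t ih => simp [List.foldl_cons, ih, pvGradeStep_getD_ne s k hk]

theorem pvUpdMax_some (h g : Int) : pvUpdMax (some h) g = some (max h g) := by
  simp only [pvUpdMax]
  split_ifs with hgt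
  · rw [max_eq_right (le_of_lt hgt)]
  · rw [max_eq_left (by omega)]

theorem pvUpdMin_some (h g : Int) : pvUpdMin (some h) g = some (min h g) := by
  simp only [pvUpdMin]
  split_ifs with hlt
  · rw [min_eq_right (le_of_lt hlt)]
  · rw [min_eq_left (by omega)]

theorem pvUpdMax_some_foldl (h : Int) (gs : List Int) :
    gs.foldl pvUpdMax (some h) = some (gs.foldl max h) := by
  induction gs generalizing h with
  | nil => rfl
  | cons g t ih => simp [List.foldl_cons, pvUpdMax_some, ih]

theorem pvUpdMin_some_foldl (h : Int) (gs : List Int) :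
    gs.foldl pvUpdMin (some h) = some (gs.foldl min h) := by
  induction gs generalizing h with
  | nil => rfl
  | cons g t ih => simp [List.foldl_cons, pvUpdMin_some, ih]

theorem pvUpdMax_none (gs : List Int) :
    gs.foldl pvUpdMax none = PySem.List.max? gs (fun x => x) := by
  cases gs with
  | nil => simp [PySem.List.max?]
  | cons x t =>
    rw [PySem.List.max?_id_cons]
    simpa [List.foldl_cons, pvUpdMax] using pvUpdMax_some_foldl x t

theorem pvUpdMin_none (gs : List Int) :
    gs.foldl pvUpdMin none = PySem.List.min? gs (fun x => x) := by
  cases gs with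
  | nil => simp [PySem.List.min?]
  | cons x t =>
    rw [PySem.List.min?_id_cons]
    simpa [List.foldl_cons, pvUpdMin] using pvUpdMin_some_foldl x t

theorem pvUpdMax_absorb (h : Int) (gs : List Int) (hb : ∀ x ∈ gs, x ≤ h) :
    gs.foldl pvUpdMax (some h) = some h := by
  rw [pvUpdMax_some_foldl]
  congr 1
  induction gs with
  | nil => rfl
  | cons g t ih =>
    have hg := hb g (by simp)
    simp only [List.foldl_cons, max_eq_left hg]
    exact ih (fun x hx => hb x (by simp [hx]))

theorem pvUpdMin_absorb (h : Int) (gs : List Int) (hb : ∀ x ∈ gs, h ≤ x) :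
    gs.foldl pvUpdMin (some h) = some h := by
  rw [pvUpdMin_some_foldl]
  congr 1
  induction gs with
  | nil => rfl
  | cons g t ih =>
    have hg := hb g (by simp)
    simp only [List.foldl_cons, min_eq_left hg]
    exact ih (fun x hx => hb x (by simp [hx]))

-- re-running the same grade list leaves the running extremes unchanged
theorem pvUpdMax_idem (o : Option Int) (gs : List Int) :
    gs.foldl pvUpdMax (gs.foldl pvUpdMax o) = gs.foldl pvUpdMax o := by
  cases gs with
  | nil => rfl
  | cons x t =>
    cases o with
    | none =>
      have he : (x :: t).foldl pvUpdMax none = some (t.foldl max x) := by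
        simp [List.foldl_cons, pvUpdMax, pvUpdMax_some_foldl]
      rw [he]
      apply pvUpdMax_absorb
      intro y hy
      have H := PySem.List.le_foldl_max t x
      rcases List.mem_cons.mp hy with rfl | hy
      · exact H.1
      · exact H.2 y hy
    | some h =>
      have he : (x :: t).foldl pvUpdMax (some h) = some (t.foldl max (max h x)) := by
        simp [List.foldl_cons, pvUpdMax_some, pvUpdMax_some_foldl]
      rw [he]
      apply pvUpdMax_absorb
      intro y hy
      have H := PySem.List.le_foldl_max t (max h x)
      rcases List.mem_cons.mp hy with rfl | hy
      · exact le_trans (le_max_right h y) H.1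
      · exact H.2 y hy

theorem pvUpdMin_idem (o : Option Int) (gs : List Int) :
    gs.foldl pvUpdMin (gs.foldl pvUpdMin o) = gs.foldl pvUpdMin o := by
  cases gs with
  | nil => rfl
  | cons x t =>
    cases o with
    | none =>
      have he : (x :: t).foldl pvUpdMin none = some (t.foldl min x) := by
        simp [List.foldl_cons, pvUpdMin, pvUpdMin_some_foldl]
      rw [he]
      apply pvUpdMin_absorb
      intro y hy
      have H := PySem.List.foldl_min_le t x
      rcases List.mem_cons.mp hy with rfl | hy
      · exact H.1
      · exact H.2 y hy
    | some h =>
      have he : (x :: t).foldl pvUpdMin (some h) = some (t.foldl min (min h x)) := by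
        simp [List.foldl_cons, pvUpdMin_some, pvUpdMin_some_foldl]
      rw [he]
      apply pvUpdMin_absorb
      intro y hy
      have H := PySem.List.foldl_min_le t (min h x)
      rcases List.mem_cons.mp hy with rfl | hy
      · exact le_trans H.1 (min_le_right h y)
      · exact H.2 y hy

theorem pvUpd_split (p : Option Int × Option Int) (gs : List Int) :
    gs.foldl pvUpd p = (gs.foldl pvUpdMax p.1, gs.foldl pvUpdMin p.2) := by
  induction gs generalizing p with
  | nil => rfl
  | cons g t ih => simp [List.foldl_cons, ih, pvUpd]

theorem pvUpd_idem (p : Option Int × Option Int) (gs : List Int) :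
    gs.foldl pvUpd (gs.foldl pvUpd p) = gs.foldl pvUpd p := by
  simp only [pvUpd_split]
  exact Prod.ext (pvUpdMax_idem _ _) (pvUpdMin_idem _ _)

-- one student's subjects loop, seen through getD
theorem pvSubjFold_getD (subjects : List String) (grades : List (String × List Int))
    (d : PySem.Dict String (Option Int × Option Int)) (k : String) :
    (subjects.foldl (pvSubjStep grades) d).getD k (none, none) =
      if k ∈ subjects then
        ((PySem.Dict.mk grades).getD k []).foldl pvUpd (d.getD k (none, none))
      else d.getD k (none, none) := by
  induction subjects generalizing d with
  | nil => simp
  | cons s t ih =>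
    rw [List.foldl_cons, ih]
    by_cases hks : k = s
    · subst hks
      have hstep : (pvSubjStep grades d k).getD k (none, none) =
          ((PySem.Dict.mk grades).getD k []).foldl pvUpd (d.getD k (none, none)) := by
        unfold pvSubjStep
        exact pvGradeFold_getD_self k _ d
      by_cases hkt : k ∈ t
      · simp [hkt, hstep, pvUpd_idem]
      · simp [hkt, hstep]
    · have hstep : (pvSubjStep grades d s).getD k (none, none) = d.getD k (none, none) := by
        unfold pvSubjStep
        exact pvGradeFold_getD_ne s k hks _ d
      simp [List.mem_cons, hks, hstep]

-- the students loop, seen through getD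
theorem pvStudFold_getD (students : List (String × List (String × List Int)))
    (subjects : List String) (d : PySem.Dict String (Option Int × Option Int)) (k : String) :
    (students.foldl (fun d nb => subjects.foldl (pvSubjStep nb.2) d) d).getD k (none, none) =
      if k ∈ subjects then (pvGs students k).foldl pvUpd (d.getD k (none, none))
      else d.getD k (none, none) := by
  induction students generalizing d with
  | nil => simp [pvGs]
  | cons st rest ih =>
    rw [List.foldl_cons, ih, pvSubjFold_getD]
    by_cases hk : k ∈ subjects
    · simp [hk, pvGs, List.flatMap_cons, List.foldl_append]
    · simp [hk]

theorem pvInit_getD_aux (subjects : List String) (k : String)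
    (d : PySem.Dict String (Option Int × Option Int))
    (hd : d.getD k (none, none) = (none, none)) :
    (subjects.foldl (fun d s => d.insert s (none, none)) d).getD k (none, none) = (none, none) := by
  induction subjects generalizing d with
  | nil => exact hd
  | cons s t ih =>
    rw [List.foldl_cons]
    apply ih
    rw [PySem.Dict.getD_insert]
    split
    · rfl
    · exact hd

theorem pvInit_getD (subjects : List String) (k : String) :
    (subjects.foldl (fun d s => d.insert s (none, none)) (PySem.Dict.empty : PySem.Dict String (Option Int × Option Int))).getD k (none, none) = (none, none) := by
  exact pvInit_getD_aux subjects k _ (by simp [PySem.Dict.getD_empty])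

theorem pvInit_keys (subjects : List String) :
    (subjects.foldl (fun d s => d.insert s (none, none)) (PySem.Dict.empty : PySem.Dict String (Option Int × Option Int))).keys = PySem.List.dedup subjects := by
  rw [PySem.Dict.keys_foldl_insert]
  simp [PySem.Set.update_nil_left]

theorem pvGradeStep_keys (s : String) (d : PySem.Dict String (Option Int × Option Int)) (g : Int)
    (hc : d.contains s = true) : (pvGradeStep s d g).keys = d.keys := by
  unfold pvGradeStep
  rcases h : d.getD s (none, none) with ⟨h1, h2⟩
  have hkeys : ∀ v, (d.insert s v).keys = d.keys := fun v => PySem.Dict.keys_insert_of_contains d v hc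
  have hc' : ∀ v, (d.insert s v).contains s = true := by
    intro v
    simp [PySem.Dict.contains_insert]
  cases h1 <;> cases h2 <;>
    simp only [h] <;> (try split_ifs) <;>
    simp_all [PySem.Dict.keys_insert_of_contains, PySem.Dict.contains_insert] <;>
    (try split_ifs) <;>
    simp_all [PySem.Dict.keys_insert_of_contains, PySem.Dict.contains_insert]

theorem pvGradeFold_keys (s : String) (gs : List Int)
    (d : PySem.Dict String (Option Int × Option Int)) (hc : d.contains s = true) :
    (gs.foldl (pvGradeStep s) d).keys = d.keys := by
  induction gs generalizing d with
  | nil => rfl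
  | cons g t ih =>
    rw [List.foldl_cons]
    have hk := pvGradeStep_keys s d g hc
    have hc' : (pvGradeStep s d g).contains s = true := by
      rw [PySem.Dict.contains_eq_decide_mem_keys, hk, ← PySem.Dict.contains_eq_decide_mem_keys]
      exact hc
    rw [ih _ hc', hk]

theorem pvSubjFold_keys (subjects : List String) (grades : List (String × List Int))
    (d : PySem.Dict String (Option Int × Option Int))
    (hc : ∀ s ∈ subjects, d.contains s = true) :
    (subjects.foldl (pvSubjStep grades) d).keys = d.keys := by
  induction subjects generalizing d with
  | nil => rfl
  | cons s t ih =>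
    rw [List.foldl_cons]
    have hk : (pvSubjStep grades d s).keys = d.keys := by
      unfold pvSubjStep
      exact pvGradeFold_keys s _ d (hc s (by simp))
    have hc' : ∀ x ∈ t, (pvSubjStep grades d s).contains x = true := by
      intro x hx
      rw [PySem.Dict.contains_eq_decide_mem_keys, hk, ← PySem.Dict.contains_eq_decide_mem_keys]
      exact hc x (by simp [hx])
    rw [ih _ hc', hk]

theorem pvStudFold_keys (students : List (String × List (String × List Int)))
    (subjects : List String) (d : PySem.Dict String (Option Int × Option Int))
    (hc : ∀ s ∈ subjects, d.contains s = true) :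
    (students.foldl (fun d nb => subjects.foldl (pvSubjStep nb.2) d) d).keys = d.keys := by
  induction students generalizing d with
  | nil => rfl
  | cons st rest ih =>
    rw [List.foldl_cons]
    have hk := pvSubjFold_keys subjects st.2 d hc
    have hc' : ∀ s ∈ subjects, (subjects.foldl (pvSubjStep st.2) d).contains s = true := by
      intro s hs
      rw [PySem.Dict.contains_eq_decide_mem_keys, hk, ← PySem.Dict.contains_eq_decide_mem_keys]
      exact hc s hs
    rw [ih _ hc', hk]

theorem pvFinal_keys (students : List (String × List (String × List Int))) (subjects : List String) :
    (students.foldl (fun d nb => subjects.foldl (pvSubjStep nb.2) d)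
      (subjects.foldl (fun d s => d.insert s (none, none)) (PySem.Dict.empty : PySem.Dict String (Option Int × Option Int)))).keys = PySem.List.dedup subjects := by
  rw [pvStudFold_keys, pvInit_keys]
  intro s hs
  rw [PySem.Dict.contains_eq_decide_mem_keys, pvInit_keys]
  simp [PySem.List.mem_dedup, hs]

-- ===== VERDICT (by name: the statement is the Claim_ definition above) =====
theorem calculate_subject_extremes_spec : Claim_equal_calculate_subject_extremes := by
  intro students subjects _
  unfold Spec_calculate_subject_extremes calculate_subject_extremes calculate_subject_extremes_alt
  dsimp only
  have hkeys := pvFinal_keys students subjects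
  have hnodup : (students.foldl (fun d nb => subjects.foldl (pvSubjStep nb.2) d)
      (subjects.foldl (fun d s => d.insert s (none, none)) PySem.Dict.empty)).keys.Nodup := by
    rw [hkeys]; exact PySem.List.nodup_dedup subjects
  rw [PySem.Dict.items_eq_map_keys _ hnodup (none, none), hkeys, List.map_map]
  apply List.map_congr_left
  intro s hs
  have hmem : s ∈ subjects := (PySem.List.mem_dedup subjects s).mp hs
  have hget := pvStudFold_getD students subjects
    (subjects.foldl (fun d s => d.insert s (none, none)) PySem.Dict.empty) s
  rw [if_pos hmem, pvInit_getD] at hget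
  simp only [Function.comp_apply, hget, pvUpd_split, pvUpdMax_none, pvUpdMin_none, pvGs]
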